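-- pv_equiv track=rewrite | github.com/jmagar/transdock | backend/api/auth.py | get_password_validation_errors
-- ===== SOURCE A (Python) =====
-- from typing import Optional, Dict, Any, List, Set
--
-- def get_password_validation_errors(password: str) -> List[str]:
--     """
--     Get specific password validation errors.
--
--     Args:
--         password: Password to validate
--
--     Returns:
--         List[str]: List of specific validation error messages.
--                   Empty list if password meets all requirements.
--     """
--     errors = []
--
--     if len(password) < 8:
--         errors.append("Password must be at least 8 characters long")
--
--     if not any(c.isupper() for c in password):
--         errors.append("Password must contain at least one uppercase letter (A-Z)")
--
--     if not any(c.islower() for c in password):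
--         errors.append("Password must contain at least one lowercase letter (a-z)")
--
--     if not any(c.isdigit() for c in password):
--         errors.append("Password must contain at least one digit (0-9)")
--
--     return errors
-- ===== SOURCE B (Python) =====
-- def get_password_validation_errors(password: str) -> list:
--     has_upper = has_lower = has_digit = False
--     for c in password:
--         has_upper = has_upper or c.isupper()
--         has_lower = has_lower or c.islower()
--         has_digit = has_digit or c.isdigit()
--         if has_upper and has_lower and has_digit:
--             break
--     errors = []
--     if len(password) < 8:
--         errors.append("Password must be at least 8 characters long")
--     if not has_upper:
--         errors.append("Password must contain at least one uppercase letter (A-Z)")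
--     if not has_lower:
--         errors.append("Password must contain at least one lowercase letter (a-z)")
--     if not has_digit:
--         errors.append("Password must contain at least one digit (0-9)")
--     return errors
-- ===== Notes on version B (the rewrite author's own statement) =====
-- stated objective: simpler
-- what changed: Replaces three separate any() scans over the password with a single character loop that accumulates has_upper/has_lower/has_digit flags (breaking early once all hold), then builds the error list from the flags.
import Mathlib
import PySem

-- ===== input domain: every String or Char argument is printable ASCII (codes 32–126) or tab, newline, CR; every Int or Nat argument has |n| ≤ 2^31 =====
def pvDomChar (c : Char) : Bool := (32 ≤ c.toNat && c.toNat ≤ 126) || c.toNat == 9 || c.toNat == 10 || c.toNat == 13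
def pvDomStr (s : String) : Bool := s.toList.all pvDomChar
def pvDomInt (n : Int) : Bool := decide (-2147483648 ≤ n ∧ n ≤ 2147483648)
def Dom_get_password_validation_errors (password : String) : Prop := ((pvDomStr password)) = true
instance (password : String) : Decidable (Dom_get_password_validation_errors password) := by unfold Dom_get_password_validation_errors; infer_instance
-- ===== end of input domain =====

-- B replaces A's three separate any() scans with one flag-accumulating pass (early break); same result, simpler traversal.

-- ===== PORT A =====
def get_password_validation_errors (password : String) : List String :=
  let errors : List String := []
  let errors := if PySem.Str.len password < 8 then errors ++ ["Password must be at least 8 characters long"] else errors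
  let errors := if ¬ (password.toList.any (fun c => PySem.Chars.isupper c)) then errors ++ ["Password must contain at least one uppercase letter (A-Z)"] else errors
  let errors := if ¬ (password.toList.any (fun c => PySem.Chars.islower c)) then errors ++ ["Password must contain at least one lowercase letter (a-z)"] else errors
  let errors := if ¬ (password.toList.any (fun c => PySem.Chars.isdigit c)) then errors ++ ["Password must contain at least one digit (0-9)"] else errors
  errors

-- ===== PORT B =====
-- the single loop of Source B: accumulate the three flags, break once all are true
def pvScanFlags : List Char → Bool → Bool → Bool → Bool × Bool × Bool
  | [], u, l, d => (u, l, d)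
  | c :: cs, u, l, d =>
    let u := u || PySem.Chars.isupper c
    let l := l || PySem.Chars.islower c
    let d := d || PySem.Chars.isdigit c
    if u && l && d then (u, l, d) else pvScanFlags cs u l d

def get_password_validation_errors_alt (password : String) : List String :=
  let (hasU, hasL, hasD) := pvScanFlags password.toList false false false
  let errors : List String := []
  let errors := if PySem.Str.len password < 8 then errors ++ ["Password must be at least 8 characters long"] else errors
  let errors := if hasU = false then errors ++ ["Password must contain at least one uppercase letter (A-Z)"] else errors
  let errors := if hasL = false then errors ++ ["Password must contain at least one lowercase letter (a-z)"] else errors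
  let errors := if hasD = false then errors ++ ["Password must contain at least one digit (0-9)"] else errors
  errors

-- ===== PRECONDITION & SPEC =====
def Spec_get_password_validation_errors (password : String) (out : List String) : Prop := out = get_password_validation_errors_alt password
instance (password : String) (out : List String) : Decidable (Spec_get_password_validation_errors password out) := by unfold Spec_get_password_validation_errors; infer_instance

-- ===== CLAIM =====
def Claim_equal_get_password_validation_errors : Prop := ∀ (password : String), Dom_get_password_validation_errors password → Spec_get_password_validation_errors password (get_password_validation_errors password)

-- ===== LEMMAS AND PROOFS =====
theorem pvScanFlags_eq (cs : List Char) (u l d : Bool) :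
    pvScanFlags cs u l d =
      (u || cs.any (fun c => PySem.Chars.isupper c),
       l || cs.any (fun c => PySem.Chars.islower c),
       d || cs.any (fun c => PySem.Chars.isdigit c)) := by
  induction cs generalizing u l d with
  | nil => simp [pvScanFlags]
  | cons c cs ih =>
    simp only [pvScanFlags, List.any_cons]
    split
    · rename_i h
      simp only [Bool.and_eq_true] at h
      obtain ⟨⟨hu, hl⟩, hd⟩ := h
      simp only [Bool.or_eq_true] at hu hl hd
      refine Prod.ext ?_ (Prod.ext ?_ ?_) <;> simp only
      · rcases hu with h | h <;> simp [h]
      · rcases hl with h | h <;> simp [h]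
      · rcases hd with h | h <;> simp [h]
    · rw [ih]
      simp [Bool.or_assoc]

-- ===== VERDICT =====
theorem get_password_validation_errors_spec : Claim_equal_get_password_validation_errors := by
  intro password _
  unfold Spec_get_password_validation_errors get_password_validation_errors get_password_validation_errors_alt
  rw [pvScanFlags_eq]
  simp
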